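-- pv_equiv track=rewrite | github.com/stdstring/stepik-tasks | competitive_programming/module4/test3.py | calc_ones
-- ===== SOURCE A (Python) =====
-- import typing
--
-- def calc_ones(numbers: typing.List[int]) -> typing.List[int]:
--     dest = []
--     for number in numbers:
--         count = 0
--         while number > 0:
--             count += (number & 1)
--             number >>= 1
--         dest.append(count)
--     return dest
-- ===== SOURCE B (Python) =====
-- import typing
--
-- def calc_ones(numbers: typing.List[int]) -> typing.List[int]:
--     dest = []
--     for number in numbers:
--         count = 0
--         while number > 0:
--             number &= number - 1
--             count += 1
--         dest.append(count)
--     return dest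
-- ===== Notes on version B (the rewrite author's own statement) =====
-- stated objective: faster
-- what changed: Per-number inner loop replaced: instead of shifting right and testing every bit position, B clears the lowest set bit each iteration (Brian Kernighan), iterating once per set bit rather than once per bit.
import Mathlib
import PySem

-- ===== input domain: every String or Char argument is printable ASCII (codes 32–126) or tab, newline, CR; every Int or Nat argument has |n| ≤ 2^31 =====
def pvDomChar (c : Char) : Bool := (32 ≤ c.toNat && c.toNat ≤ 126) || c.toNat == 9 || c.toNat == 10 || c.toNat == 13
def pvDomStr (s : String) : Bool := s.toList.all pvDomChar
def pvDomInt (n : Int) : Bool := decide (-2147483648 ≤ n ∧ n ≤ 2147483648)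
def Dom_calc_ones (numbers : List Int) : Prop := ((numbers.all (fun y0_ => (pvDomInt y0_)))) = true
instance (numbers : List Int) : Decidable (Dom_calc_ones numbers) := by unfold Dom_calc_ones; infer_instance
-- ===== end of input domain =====

-- B replaces A's shift-and-test inner loop (one iteration per bit position) by
-- Brian Kernighan's clear-lowest-set-bit loop (one iteration per set bit): a
-- different per-number algorithm of similar cost.


-- ===== PORT A =====
-- termination helper for A's while loop: shifting a positive int right decreases it
theorem pvShiftLt (n : Int) (h : 0 < n) : (n >>> (1:Int)).toNat < n.toNat := by
  obtain ⟨k, rfl⟩ := Int.eq_ofNat_of_zero_le h.le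
  rw [show ((k:Int) >>> (1:Int)) = ((k >>> 1 : Nat) : Int) from (Int.shiftRight_natCast k 1).symm]
  have hk : 0 < k := by exact_mod_cast h
  simp only [Int.toNat_natCast, Nat.shiftRight_succ, Nat.shiftRight_zero]
  omega

-- while number > 0: count += (number & 1); number >>= 1
def pvLoopA (number count : Int) : Int :=
  if number > 0 then pvLoopA (number >>> (1:Int)) (count + Int.land number 1) else count
termination_by number.toNat
decreasing_by exact pvShiftLt number (by omega)

def calc_ones (numbers : List Int) : List Int :=
  numbers.foldl (fun dest number => dest ++ [pvLoopA number 0]) []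

-- ===== PORT B =====
-- termination helper for B's while loop: clearing the lowest set bit decreases a positive int
theorem pvClearLt (n : Int) (h : 0 < n) : (Int.land n (n - 1)).toNat < n.toNat := by
  obtain ⟨k, rfl⟩ := Int.eq_ofNat_of_zero_le h.le
  have hk : 0 < k := by exact_mod_cast h
  rw [show ((k:Int) - 1) = ((k - 1 : Nat) : Int) by omega]
  rw [show Int.land (k:Int) ((k-1 : Nat) : Int) = ((k &&& (k-1) : Nat) : Int) from rfl]
  have := Nat.and_le_right (n := k) (m := k - 1)
  simp only [Int.toNat_natCast]
  omega

-- while number > 0: number &= number - 1; count += 1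
def pvLoopB (number count : Int) : Int :=
  if number > 0 then pvLoopB (Int.land number (number - 1)) (count + 1) else count
termination_by number.toNat
decreasing_by exact pvClearLt number (by omega)

def calc_ones_alt (numbers : List Int) : List Int :=
  numbers.foldl (fun dest number => dest ++ [pvLoopB number 0]) []

-- ===== PRECONDITION & SPEC =====
def Spec_calc_ones (numbers : List Int) (out : List Int) : Prop := out = calc_ones_alt numbers
instance (numbers : List Int) (out : List Int) : Decidable (Spec_calc_ones numbers out) := by unfold Spec_calc_ones; infer_instance

-- ===== CLAIM (what is proved, stated in full; the proofs are below) =====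
def Claim_equal_calc_ones : Prop := ∀ (numbers : List Int), Dom_calc_ones numbers → Spec_calc_ones numbers (calc_ones numbers)

-- ===== LEMMAS AND PROOFS =====

-- reference popcount on Nat
def pvPopc (k : Nat) : Nat :=
  if k = 0 then 0 else k % 2 + pvPopc (k / 2)
decreasing_by omega

theorem pvPopc_zero : pvPopc 0 = 0 := by simp [pvPopc]

theorem pvPopc_double (m : Nat) : pvPopc (2 * m) = pvPopc m := by
  rcases Nat.eq_zero_or_pos m with h | h
  · simp [h, pvPopc_zero]
  · rw [pvPopc]
    simp only [if_neg (by omega : ¬ 2 * m = 0)]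
    rw [Nat.mul_mod_right, Nat.mul_div_cancel_left _ (by norm_num : 0 < 2)]
    omega

theorem pvPopc_odd (m : Nat) : pvPopc (2 * m + 1) = pvPopc m + 1 := by
  rw [pvPopc]
  simp only [if_neg (by omega : ¬ 2 * m + 1 = 0)]
  have h1 : (2 * m + 1) % 2 = 1 := by omega
  have h2 : (2 * m + 1) / 2 = m := by omega
  rw [h1, h2]; omega

-- k odd: k &&& (k-1) = k - 1 (the lowest set bit is bit 0)
theorem pvLand_pred_odd (k : Nat) (h : k % 2 = 1) : k &&& (k - 1) = k - 1 := by
  apply Nat.eq_of_testBit_eq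
  intro i
  cases i with
  | zero =>
      simp only [Nat.testBit_zero]
      have h2 : (k - 1) % 2 = 0 := by omega
      simp [h2]
  | succ i =>
      rw [Nat.testBit_succ, Nat.testBit_succ, Nat.and_div_two]
      have : k / 2 = (k - 1) / 2 := by omega
      rw [this, Nat.and_self]

-- k = 2m even, m > 0: (2m) &&& (2m - 1) = 2 * (m &&& (m-1))
theorem pvLand_pred_even (m : Nat) (h : 0 < m) :
    (2 * m) &&& (2 * m - 1) = 2 * (m &&& (m - 1)) := by
  apply Nat.eq_of_testBit_eq
  intro i
  cases i with
  | zero =>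
      simp only [Nat.testBit_zero]
      have ha' : ¬ (2 * m % 2 = 1) := by omega
      have hb' : ¬ (2 * (m &&& (m - 1)) % 2 = 1) := by omega
      simp [Nat.mod_two_ne_one.mp ha', Nat.mod_two_ne_one.mp hb']
  | succ i =>
      rw [Nat.testBit_succ, Nat.testBit_succ, Nat.and_div_two]
      have h1 : 2 * m / 2 = m := by omega
      have h2 : (2 * m - 1) / 2 = m - 1 := by omega
      have h3 : 2 * (m &&& (m - 1)) / 2 = m &&& (m - 1) := by omega
      rw [h1, h2, h3]

-- Kernighan's identity: popcount drops by exactly one when the lowest set bit is cleared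
theorem pvPopc_land_pred (k : Nat) (h : 0 < k) :
    pvPopc (k &&& (k - 1)) + 1 = pvPopc k := by
  induction k using Nat.strong_induction_on with
  | _ k ih =>
    rcases Nat.even_or_odd k with ⟨m, hm⟩ | ⟨m, hm⟩
    · have hm' : k = 2 * m := by omega
      subst hm'
      have hm0 : 0 < m := by omega
      rw [pvLand_pred_even m hm0, pvPopc_double, pvPopc_double]
      exact ih m (by omega) hm0
    · subst hm
      rw [pvLand_pred_odd (2 * m + 1) (by omega)]
      rw [show 2 * m + 1 - 1 = 2 * m by omega, pvPopc_double, pvPopc_odd]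

-- A's loop computes count + popcount(toNat number)
theorem pvLoopA_eq (number count : Int) :
    pvLoopA number count = count + (pvPopc number.toNat : Int) := by
  by_cases h : 0 < number
  · obtain ⟨k, rfl⟩ := Int.eq_ofNat_of_zero_le h.le
    induction k using Nat.strong_induction_on generalizing count with
    | _ k ih =>
      rw [pvLoopA]
      rw [if_pos (show _ > (0:Int) from h)]
      have hk : 0 < k := by exact_mod_cast h
      rw [show ((k:Int) >>> (1:Int)) = ((k >>> 1 : Nat) : Int) from (Int.shiftRight_natCast k 1).symm]
      rw [show Int.land (k:Int) 1 = ((k &&& 1 : Nat) : Int) from rfl]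
      have hdiv : k >>> 1 = k / 2 := by
        simp [Nat.shiftRight_succ, Nat.shiftRight_zero]
      have hl1 : k &&& 1 = k % 2 := Nat.and_one_is_mod k
      rcases Nat.eq_zero_or_pos (k / 2) with hz | hp
      · have hk1 : k = 1 := by omega
        subst hk1
        have h1 : pvPopc 1 = 1 := by simp [pvPopc]
        simp only [show (1:Nat) >>> 1 = 0 from rfl, show (1:Nat) &&& 1 = 1 from rfl,
          show ((1:Nat):Int).toNat = 1 from rfl, h1]
        rw [pvLoopA, if_neg (by norm_num : ¬ ((0:Nat):Int) > 0)]
      · have := ih (k >>> 1) (by omega) (count + ((k &&& 1 : Nat) : Int))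
            (by simpa [hdiv] using (show (0:Int) < ((k/2 : Nat) : Int) by exact_mod_cast hp))
        rw [this]
        simp only [Int.toNat_natCast, hdiv, hl1]
        conv_rhs => rw [pvPopc]
        rw [if_neg (by omega : ¬ k = 0)]
        push_cast
        ring
  · rw [pvLoopA, if_neg h]
    have h0 : number.toNat = 0 := by omega
    rw [h0, pvPopc_zero]
    simp

-- B's loop computes count + popcount(toNat number)
theorem pvLoopB_eq (number count : Int) :
    pvLoopB number count = count + (pvPopc number.toNat : Int) := by
  by_cases h : 0 < number
  · obtain ⟨k, rfl⟩ := Int.eq_ofNat_of_zero_le h.le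
    induction k using Nat.strong_induction_on generalizing count with
    | _ k ih =>
      rw [pvLoopB]
      rw [if_pos (show _ > (0:Int) from h)]
      have hk : 0 < k := by exact_mod_cast h
      rw [show ((k:Int) - 1) = ((k - 1 : Nat) : Int) by omega]
      rw [show Int.land (k:Int) ((k - 1 : Nat) : Int) = ((k &&& (k-1) : Nat) : Int) from rfl]
      have hlt : k &&& (k - 1) < k := by
        have := Nat.and_le_right (n := k) (m := k - 1); omega
      have hpc := pvPopc_land_pred k hk
      rcases Nat.eq_zero_or_pos (k &&& (k - 1)) with hz | hp
      · rw [hz]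
        rw [pvLoopB, if_neg (by norm_num : ¬ ((0:Nat):Int) > 0)]
        rw [hz, pvPopc_zero] at hpc
        simp only [Int.toNat_natCast]
        omega
      · have := ih (k &&& (k-1)) hlt (count + 1) (by exact_mod_cast hp)
        rw [this]
        simp only [Int.toNat_natCast]
        omega
  · rw [pvLoopB, if_neg h]
    have h0 : number.toNat = 0 := by omega
    rw [h0, pvPopc_zero]
    simp

-- the two folds agree element by element
theorem pvFold_eq (numbers : List Int) (acc : List Int) :
    numbers.foldl (fun dest number => dest ++ [pvLoopA number 0]) acc
      = numbers.foldl (fun dest number => dest ++ [pvLoopB number 0]) acc := by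
  induction numbers generalizing acc with
  | nil => rfl
  | cons x xs ih =>
      simp only [List.foldl_cons]
      rw [pvLoopA_eq, pvLoopB_eq, ih]

-- ===== VERDICT (by name: the statement is the Claim_ definition above) =====
theorem calc_ones_spec : Claim_equal_calc_ones := by
  intro numbers _
  unfold Spec_calc_ones calc_ones calc_ones_alt
  exact pvFold_eq numbers []
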